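-- pv_equiv track=rewrite | github.com/bipentihexium/wys_arg_tools | scripts/wys_lib.py | humanscantsolvethis_keys_from_result
-- ===== SOURCE A (Python) =====
-- def humanscantsolvethis_keys_from_result(data:str, result:str, offsets=[0]) -> list:
-- 	"""generates possible keys for humanscantsolvethis... decryption from result;
-- 	offsets is iterable of search starting positions (default [0])"""
-- 	keys = [("", o-1) for o in offsets]
-- 	indices = []
-- 	for res_c in result:
-- 		indices.append([i for i, c in enumerate(data) if c == res_c])
-- 	for i in indices:
-- 		for j, k in reversed(list(enumerate(keys))):
-- 			opts = [x for x in i if x - k[1] > 1 and x - k[1] < 28]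
-- 			keys.pop(j)
-- 			for o in opts:
-- 				nk = k[0]+chr(63+o-k[1])
-- 				keys.append((nk, o))
-- 	return [key for key, endindex in keys]
-- ===== SOURCE B (Python) =====
-- def _bisect_left(a, x):
-- 	"""standard-library bisect_left (hand-written because this module imports nothing)"""
-- 	lo, hi = 0, len(a)
-- 	while lo < hi:
-- 		mid = (lo + hi) // 2
-- 		if a[mid] < x:
-- 			lo = mid + 1
-- 		else:
-- 			hi = mid
-- 	return lo
--
-- def humanscantsolvethis_keys_from_result(data:str, result:str, offsets=[0]) -> list:
-- 	"""generates possible keys for humanscantsolvethis... decryption from result;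
-- 	offsets is iterable of search starting positions (default [0])"""
-- 	positions = {}
-- 	for i, c in enumerate(data):
-- 		positions.setdefault(c, []).append(i)
-- 	keys = [("", o - 1) for o in offsets]
-- 	for res_c in result:
-- 		lst = positions.get(res_c, [])
-- 		new_keys = []
-- 		for prefix, end in reversed(keys):
-- 			lo = _bisect_left(lst, end + 2)
-- 			hi = _bisect_left(lst, end + 28)
-- 			for o in lst[lo:hi]:
-- 				new_keys.append((prefix + chr(63 + o - end), o))
-- 		keys = new_keys
-- 	return [prefix for prefix, _ in keys]
-- ===== Notes on version B (the rewrite author's own statement) =====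
-- stated objective: alternative
-- what changed: B builds a char->positions dictionary in one pass over data (instead of A's full rescan of data per result character) and finds each key's bounded (end+1,end+28) candidate window by binary search on the sorted position list plus a slice, instead of A's full filter of the whole index list per key; A's reversed enumerate/pop/append list surgery becomes a plain rebuild of the key list.
import Mathlib
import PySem

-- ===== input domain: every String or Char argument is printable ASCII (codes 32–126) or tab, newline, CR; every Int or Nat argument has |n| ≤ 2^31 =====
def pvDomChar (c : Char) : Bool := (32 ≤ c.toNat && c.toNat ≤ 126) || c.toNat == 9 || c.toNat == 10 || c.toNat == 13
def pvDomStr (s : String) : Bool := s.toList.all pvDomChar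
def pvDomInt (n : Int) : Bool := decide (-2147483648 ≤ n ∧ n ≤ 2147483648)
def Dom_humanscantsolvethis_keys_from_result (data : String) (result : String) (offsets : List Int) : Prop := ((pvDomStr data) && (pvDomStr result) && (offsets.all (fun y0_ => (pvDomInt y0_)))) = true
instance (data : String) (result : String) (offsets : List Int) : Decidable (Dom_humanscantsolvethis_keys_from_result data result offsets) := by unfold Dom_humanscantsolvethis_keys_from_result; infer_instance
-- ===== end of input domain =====

-- B replaces A's per-result-character rescan of `data` and per-key full filter of the index
-- list by a positions dictionary built once plus binary search (bisect_left) for each key's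
-- (end+1, end+28) window, rebuilding the key list instead of A's pop/append surgery.

-- ===== PORT A =====
-- keys.pop(j): j comes from enumerate over the loop's snapshot of keys, so it is a valid
-- non-negative index of the current list; Python's pop(j) is exactly eraseIdx at j.toNat here.
-- chr(63+o-k[1]): the filter guarantees 1 < o-k[1] < 28, so the argument is 65..90 and
-- Char.ofNat is exactly Python's chr on it.
def humanscantsolvethis_keys_from_result (data : String) (result : String) (offsets : List Int) : List String :=
  let keys : List (String × Int) := offsets.map (fun o => ("", o - 1))
  let indices : List (List Int) :=
    result.toList.map (fun res_c =>
      ((PySem.List.enumerate data.toList 0).filter (fun ic => ic.2 == res_c)).map (fun ic => ic.1))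
  let keys := indices.foldl (fun keys i =>
    ((PySem.List.enumerate keys 0).reverse).foldl (fun cur jk =>
      let opts := i.filter (fun x => decide (x - jk.2.2 > 1 ∧ x - jk.2.2 < 28))
      let cur := cur.eraseIdx jk.1.toNat
      opts.foldl (fun cur o =>
        cur ++ [(jk.2.1 ++ (Char.ofNat (63 + o - jk.2.2).toNat).toString, o)]) cur) keys) keys
  keys.map (fun p => p.1)

-- ===== PORT B =====
-- positions.setdefault(c, []).append(i) is Dict.modify c [] (· ++ [i]) (same key order, same lists)
def pvPositions (data : List Char) : PySem.Dict Char (List Int) :=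
  (PySem.List.enumerate data 0).foldl (fun d ic => d.modify ic.2 [] (· ++ [ic.1])) PySem.Dict.empty

-- Source B's hand-written _bisect_left is the standard-library bisect_left loop; ported as
-- PySem.List.bisectLeft (exact). chr as in port A (argument always 65..90 inside the window).
def humanscantsolvethis_keys_from_result_alt (data : String) (result : String) (offsets : List Int) : List String :=
  let positions := pvPositions data.toList
  let keys0 : List (String × Int) := offsets.map (fun o => ("", o - 1))
  let keys := result.toList.foldl (fun keys res_c =>
    let lst := positions.getD res_c []
    keys.reverse.foldl (fun nk pe =>
      let lo := PySem.List.bisectLeft lst (pe.2 + 2)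
      let hi := PySem.List.bisectLeft lst (pe.2 + 28)
      (PySem.List.slice lst (some (lo : Int)) (some (hi : Int))).foldl (fun nk o =>
        nk ++ [(pe.1 ++ (Char.ofNat (63 + o - pe.2).toNat).toString, o)]) nk) []) keys0
  keys.map (fun p => p.1)

-- ===== PRECONDITION & SPEC =====
def Spec_humanscantsolvethis_keys_from_result (data : String) (result : String) (offsets : List Int) (out : List String) : Prop := out = humanscantsolvethis_keys_from_result_alt data result offsets
instance (data : String) (result : String) (offsets : List Int) (out : List String) : Decidable (Spec_humanscantsolvethis_keys_from_result data result offsets out) := by unfold Spec_humanscantsolvethis_keys_from_result; infer_instance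

-- ===== CLAIM (what is proved, stated in full; the proofs are below) =====
def Claim_equal_humanscantsolvethis_keys_from_result : Prop := ∀ (data : String) (result : String) (offsets : List Int), Dom_humanscantsolvethis_keys_from_result data result offsets → Spec_humanscantsolvethis_keys_from_result data result offsets (humanscantsolvethis_keys_from_result data result offsets)

-- ===== LEMMAS AND PROOFS =====

-- the positions dictionary looks up exactly A's per-character index list
theorem pvPositions_getD (data : List Char) (c : Char) :
    (pvPositions data).getD c []
      = ((PySem.List.enumerate data 0).filter (fun ic => ic.2 == c)).map (fun ic => ic.1) := by
  have hfold : pvPositions data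
      = (((PySem.List.enumerate data 0).map (fun ic => (ic.2, ic.1))).foldl
          (fun d p => d.modify p.1 [] (· ++ [p.2])) PySem.Dict.empty) := by
    unfold pvPositions
    rw [List.foldl_map]
  rw [hfold, PySem.Dict.getD_foldl_modify_append]
  rw [List.filter_map]
  simp [Function.comp_def, List.map_map]

-- each index list A builds is sorted (a sublist of enumerate's strictly increasing indices)
theorem pvIndices_sorted (data : List Char) (c : Char) :
    (((PySem.List.enumerate data 0).filter (fun ic => ic.2 == c)).map
        (fun ic => ic.1)).Pairwise (· ≤ ·) := by
  have h := PySem.List.pairwise_lt_enumerate data 0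
  have h2 := h.filter (fun ic => ic.2 == c)
  rw [List.pairwise_map]
  exact h2.imp (fun h => le_of_lt h)

-- A's reversed-enumerate pop/append loop is a flatMap over the reversed key list
theorem pvPopRound (f : (String × Int) → List (String × Int)) :
    ∀ (ks rest : List (String × Int)),
      ((PySem.List.enumerate ks 0).reverse).foldl
          (fun cur jk => (cur.eraseIdx jk.1.toNat) ++ f jk.2) (ks ++ rest)
        = rest ++ ks.reverse.flatMap f := by
  intro ks
  induction ks using List.reverseRecOn with
  | nil => intro rest; simp [PySem.List.enumerate_nil]
  | append_singleton ks' k ih =>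
    intro rest
    rw [PySem.List.enumerate_append, List.reverse_append]
    rw [PySem.List.enumerate_cons, PySem.List.enumerate_nil]
    rw [show ([((0:Int) + (ks'.length:Int), k)].reverse : List (Int × (String × Int))) = [((0:Int) + (ks'.length:Int), k)] from rfl]
    rw [List.singleton_append, List.foldl_cons]
    have he : (((ks' ++ [k] ++ rest).eraseIdx ((0 + (ks'.length : Int), k).1.toNat)) ++ f ((0 + (ks'.length : Int), k)).2)
        = ks' ++ (rest ++ f k) := by
      have h1 : ((0 : Int) + (ks'.length : Int)).toNat = ks'.length := by omega
      show ((ks' ++ [k] ++ rest).eraseIdx ((0 + (ks'.length : Int)).toNat)) ++ f k = ks' ++ (rest ++ f k)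
      rw [h1, List.append_assoc ks' [k] rest, List.eraseIdx_append_of_length_le (le_refl _)]
      simp
    rw [he, ih (rest ++ f k)]
    simp

-- the slice between the two bisection points of a sorted list is its window filter
theorem pvWindow_eq (lst : List Int) (hs : lst.Pairwise (· ≤ ·)) (a b : Int) (hab : a ≤ b) :
    PySem.List.slice lst (some ((PySem.List.bisectLeft lst a : Nat) : Int))
        (some ((PySem.List.bisectLeft lst b : Nat) : Int))
      = lst.filter (fun x => decide (a ≤ x) && decide (x < b)) := by
  rw [PySem.List.slice_natCast]
  set lo := PySem.List.bisectLeft lst a with hlo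
  set hi := PySem.List.bisectLeft lst b with hhi
  obtain ⟨hloLen, hloLt, hloGe⟩ := PySem.List.bisectLeft_spec lst a hs
  obtain ⟨hhiLen, hhiLt, hhiGe⟩ := PySem.List.bisectLeft_spec lst b hs
  have hlohi : lo ≤ hi := by
    by_contra hcon
    push Not at hcon
    have h1 : hi < lst.length := lt_of_lt_of_le hcon hloLen
    have h2 := hloLt hi h1 hcon
    have h3 := hhiGe hi h1 (le_refl _)
    omega
  have hdecomp : lst = lst.take lo ++ ((lst.drop lo).take (hi - lo) ++ lst.drop hi) := by
    have h1 : (lst.drop lo).drop (hi - lo) = lst.drop hi := by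
      rw [List.drop_drop]
      congr 1
      omega
    rw [← h1, List.take_append_drop, List.take_append_drop]
  conv_rhs => rw [hdecomp]
  rw [List.filter_append, List.filter_append]
  have hfirst : (lst.take lo).filter (fun x => decide (a ≤ x) && decide (x < b)) = [] := by
    rw [List.filter_eq_nil_iff]
    intro x hx
    obtain ⟨i, hi', hxi⟩ := List.getElem_of_mem hx
    have hilt : i < lo := by
      have := hi'
      simp [List.length_take] at this
      omega
    have hib : i < lst.length := by
      have := hi'; simp [List.length_take] at this; omega
    have : lst[i] < a := hloLt i hib hilt
    rw [List.getElem_take] at hxi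
    subst hxi
    simp
    intro h
    omega
  have hseg : ((lst.drop lo).take (hi - lo)).filter (fun x => decide (a ≤ x) && decide (x < b))
      = (lst.drop lo).take (hi - lo) := by
    rw [List.filter_eq_self]
    intro x hx
    obtain ⟨i, hi', hxi⟩ := List.getElem_of_mem hx
    have hlen : i < hi - lo ∧ lo + i < lst.length := by
      have := hi'
      simp [List.length_take, List.length_drop] at this
      omega
    rw [List.getElem_take, List.getElem_drop] at hxi
    have ha := hloGe (lo + i) (by omega) (by omega)
    have hb := hhiLt (lo + i) (by omega) (by omega)
    subst hxi
    simp
    omega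
  have hlast : (lst.drop hi).filter (fun x => decide (a ≤ x) && decide (x < b)) = [] := by
    rw [List.filter_eq_nil_iff]
    intro x hx
    obtain ⟨i, hi', hxi⟩ := List.getElem_of_mem hx
    have hib : hi + i < lst.length := by
      have := hi'; simp [List.length_drop] at this; omega
    have := hhiGe (hi + i) hib (by omega)
    rw [List.getElem_drop] at hxi
    subst hxi
    simp
    intro h
    omega
  rw [hfirst, hseg, hlast]
  simp

-- one round of A's loop (with the index list it scans) equals one round of B's loop
theorem pvRound_eq (data : List Char) (c : Char) (keys : List (String × Int)) :
    ((PySem.List.enumerate keys 0).reverse).foldl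
        (fun cur jk =>
          ((((PySem.List.enumerate data 0).filter (fun ic => ic.2 == c)).map (fun ic => ic.1)).filter
              (fun x => decide (x - jk.2.2 > 1 ∧ x - jk.2.2 < 28))).foldl
            (fun cur2 o => cur2 ++ [(jk.2.1 ++ (Char.ofNat (63 + o - jk.2.2).toNat).toString, o)])
            (cur.eraseIdx jk.1.toNat)) keys
      = keys.reverse.foldl
          (fun nk pe =>
            (PySem.List.slice ((pvPositions data).getD c [])
                (some ((PySem.List.bisectLeft ((pvPositions data).getD c []) (pe.2 + 2) : Nat) : Int))
                (some ((PySem.List.bisectLeft ((pvPositions data).getD c []) (pe.2 + 28) : Nat) : Int))).foldl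
              (fun nk o => nk ++ [(pe.1 ++ (Char.ofNat (63 + o - pe.2).toNat).toString, o)]) nk) [] := by
  have hfunA : (fun (cur : List (String × Int)) (jk : Int × (String × Int)) =>
        ((((PySem.List.enumerate data 0).filter (fun ic => ic.2 == c)).map (fun ic => ic.1)).filter
            (fun x => decide (x - jk.2.2 > 1 ∧ x - jk.2.2 < 28))).foldl
          (fun cur2 o => cur2 ++ [(jk.2.1 ++ (Char.ofNat (63 + o - jk.2.2).toNat).toString, o)])
          (cur.eraseIdx jk.1.toNat))
      = (fun cur jk => (cur.eraseIdx jk.1.toNat) ++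
          ((((PySem.List.enumerate data 0).filter (fun ic => ic.2 == c)).map (fun ic => ic.1)).filter
              (fun x => decide (x - jk.2.2 > 1 ∧ x - jk.2.2 < 28))).map
            (fun o => (jk.2.1 ++ (Char.ofNat (63 + o - jk.2.2).toNat).toString, o))) := by
    funext cur jk
    rw [PySem.List.foldl_append_singleton_eq_map]
  rw [hfunA]
  have hpop := pvPopRound (fun k =>
      ((((PySem.List.enumerate data 0).filter (fun ic => ic.2 == c)).map (fun ic => ic.1)).filter
          (fun x => decide (x - k.2 > 1 ∧ x - k.2 < 28))).map
        (fun o => (k.1 ++ (Char.ofNat (63 + o - k.2).toNat).toString, o))) keys []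
  simp only [List.append_nil, List.nil_append] at hpop
  rw [hpop]
  have hfunB : (fun (nk : List (String × Int)) (pe : String × Int) =>
        (PySem.List.slice ((pvPositions data).getD c [])
            (some ((PySem.List.bisectLeft ((pvPositions data).getD c []) (pe.2 + 2) : Nat) : Int))
            (some ((PySem.List.bisectLeft ((pvPositions data).getD c []) (pe.2 + 28) : Nat) : Int))).foldl
          (fun nk o => nk ++ [(pe.1 ++ (Char.ofNat (63 + o - pe.2).toNat).toString, o)]) nk)
      = (fun nk pe => nk ++
          (PySem.List.slice ((pvPositions data).getD c [])
              (some ((PySem.List.bisectLeft ((pvPositions data).getD c []) (pe.2 + 2) : Nat) : Int))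
              (some ((PySem.List.bisectLeft ((pvPositions data).getD c []) (pe.2 + 28) : Nat) : Int))).map
            (fun o => (pe.1 ++ (Char.ofNat (63 + o - pe.2).toNat).toString, o))) := by
    funext nk pe
    rw [PySem.List.foldl_append_singleton_eq_map]
  rw [hfunB, PySem.List.foldl_append_eq_flatMap, List.nil_append]
  congr 1
  funext pe
  rw [pvPositions_getD data c,
      pvWindow_eq _ (pvIndices_sorted data c) (pe.2 + 2) (pe.2 + 28) (by omega)]
  congr 1
  apply List.filter_congr
  intro x _
  rw [Bool.decide_and]
  congr 1
  · rw [decide_eq_decide]; omega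
  · rw [decide_eq_decide]; omega

-- ===== VERDICT (by name: the statement is the Claim_ definition above) =====
theorem humanscantsolvethis_keys_from_result_spec : Claim_equal_humanscantsolvethis_keys_from_result := by
  intro data result offsets _
  unfold Spec_humanscantsolvethis_keys_from_result
  unfold humanscantsolvethis_keys_from_result humanscantsolvethis_keys_from_result_alt
  simp only []
  congr 1
  rw [List.foldl_map]
  apply PySem.List.foldl_congr_mem
  intro acc c _
  exact pvRound_eq data.toList c acc
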